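-- pv_equiv track=rewrite | github.com/MoritzHauer/advent-of-code | 2025/Python/d04/d04.py | count_accessible_rolls
-- ===== SOURCE A (Python) =====
-- DIRECTIONS = [
--     (-1, -1), (-1, 0), (-1, 1),  # top-left, top, top-right
--     (0, -1),           (0, 1),    # left, right
--     (1, -1),  (1, 0),  (1, 1)     # bottom-left, bottom, bottom-right
-- ]
--
-- def count_accessible_rolls(grid):
--     """
--     Count the number of rolls of paper that can be accessed by a forklift.
--     A roll can be accessed if there are fewer than 4 rolls in the 8 adjacent positions.
--
--     Args:
--         grid: List of strings representing the grid
--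
--     Returns:
--         The number of rolls that can be accessed
--     """
--     if not grid:
--         return 0
--
--     rows = len(grid)
--     cols = len(grid[0])
--     accessible_count = 0
--
--     # Check each position in the grid
--     for row in range(rows):
--         for col in range(cols):
--             # Only check positions that have a roll of paper
--             if grid[row][col] == '@':
--                 # Count adjacent rolls
--                 adjacent_rolls = 0
--
--                 for dr, dc in DIRECTIONS:
--                     new_row = row + dr
--                     new_col = col + dc
--
--                     # Check if the position is within bounds
--                     if 0 <= new_row < rows and 0 <= new_col < cols:
--                         if grid[new_row][new_col] == '@':
--                             adjacent_rolls += 1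
--
--                 # A roll can be accessed if there are fewer than 4 adjacent rolls
--                 if adjacent_rolls < 4:
--                     accessible_count += 1
--
--     return accessible_count
-- ===== SOURCE B (Python) =====
-- def count_accessible_rolls(grid):
--     """Prefix-sum re-implementation: per-row running counts of '@', then each
--     cell's neighbor count is three clamped window differences minus one."""
--     if not grid:
--         return 0
--     rows = len(grid)
--     cols = len(grid[0])
--     # prefix[r][k] = number of '@' among the first k of the row's first `cols` chars
--     prefix = []
--     for row in grid:
--         p = [0]
--         c = 0
--         for j in range(cols):
--             if row[j] == '@':
--                 c += 1
--             p.append(c)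
--         prefix.append(p)
--
--     def window(r, j):
--         # count of '@' in row r, columns max(j-1,0) .. min(j+1, cols-1)
--         if r < 0 or r >= rows:
--             return 0
--         p = prefix[r]
--         return p[min(j + 2, cols)] - p[max(j - 1, 0)]
--
--     total = 0
--     for i in range(rows):
--         for j in range(cols):
--             if grid[i][j] == '@':
--                 if window(i - 1, j) + window(i, j) + window(i + 1, j) - 1 < 4:
--                     total += 1
--     return total
-- ===== Notes on version B (the rewrite author's own statement) =====
-- stated objective: alternative
-- what changed: Replaces the per-cell 8-direction bounds-checked neighbor scan with per-row prefix sums of '@' built in one pass, so each cell's neighbor count becomes three clamped prefix-difference window lookups minus one.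
import Mathlib
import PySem

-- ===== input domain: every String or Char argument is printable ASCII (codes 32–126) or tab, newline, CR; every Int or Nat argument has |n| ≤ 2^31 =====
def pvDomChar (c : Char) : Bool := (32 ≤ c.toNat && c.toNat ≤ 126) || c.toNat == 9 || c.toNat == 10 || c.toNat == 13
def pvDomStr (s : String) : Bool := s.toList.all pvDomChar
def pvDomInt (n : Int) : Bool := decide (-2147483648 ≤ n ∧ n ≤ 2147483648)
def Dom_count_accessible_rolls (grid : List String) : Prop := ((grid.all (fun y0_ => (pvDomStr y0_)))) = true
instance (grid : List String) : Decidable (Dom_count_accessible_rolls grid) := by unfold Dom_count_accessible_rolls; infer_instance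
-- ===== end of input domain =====

-- B replaces A's per-cell 8-direction bounds-checked scan by per-row prefix sums of '@'
-- and three clamped window differences per cell (alternative algorithm, same cost class).
-- ===== PORT A =====
def pvDirs : List (Int × Int) :=
  [(-1, -1), (-1, 0), (-1, 1), (0, -1), (0, 1), (1, -1), (1, 0), (1, 1)]

-- grid[r][c] (the shared indexing expression; none where Python would raise IndexError)
def pvAt (grid : List String) (r c : Int) : Option Char :=
  match PySem.List.pyGet? grid r with
  | some s => PySem.Str.pyGet? s c
  | none => none

def count_accessible_rolls (grid : List String) : Int :=
  if grid = [] then 0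
  else
    let rows : Int := PySem.List.len grid
    let cols : Int := PySem.Str.len (PySem.List.pyGetD grid 0 "")
    (PySem.List.pyRange 0 rows 1).foldl (fun acc row =>
      (PySem.List.pyRange 0 cols 1).foldl (fun acc2 col =>
        if pvAt grid row col = some '@' then
          let adj := pvDirs.foldl (fun a d =>
            let nr := row + d.1
            let nc := col + d.2
            if 0 ≤ nr ∧ nr < rows ∧ 0 ≤ nc ∧ nc < cols then
              if pvAt grid nr nc = some '@' then a + 1 else a
            else a) (0 : Int)
          if adj < 4 then acc2 + 1 else acc2
        else acc2) acc) 0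

-- ===== PORT B =====
-- running count of '@' over the first `cols` characters of a row: [0, c1, …, c_cols]
def pvRowPrefix (s : String) (cols : Int) : List Int :=
  ((PySem.List.pyRange 0 cols 1).foldl (fun (st : List Int × Int) j =>
    let c := if PySem.Str.pyGet? s j = some '@' then st.2 + 1 else st.2
    (st.1 ++ [c], c)) ([0], 0)).1

def pvWindow (pre : List (List Int)) (rows cols : Int) (r j : Int) : Int :=
  if r < 0 ∨ rows ≤ r then 0
  else
    let p := PySem.List.pyGetD pre r []
    PySem.List.pyGetD p (min (j + 2) cols) 0 - PySem.List.pyGetD p (max (j - 1) 0) 0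

def count_accessible_rolls_alt (grid : List String) : Int :=
  if grid = [] then 0
  else
    let rows : Int := PySem.List.len grid
    let cols : Int := PySem.Str.len (PySem.List.pyGetD grid 0 "")
    let pre := grid.foldl (fun ps row => ps ++ [pvRowPrefix row cols]) []
    (PySem.List.pyRange 0 rows 1).foldl (fun acc i =>
      (PySem.List.pyRange 0 cols 1).foldl (fun acc2 j =>
        if pvAt grid i j = some '@' then
          if pvWindow pre rows cols (i - 1) j + pvWindow pre rows cols i j +
              pvWindow pre rows cols (i + 1) j - 1 < 4 then acc2 + 1 else acc2
        else acc2) acc) 0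

-- ===== PRECONDITION & SPEC =====
-- Pre_ excludes jagged grids with a row shorter than the first row: Python A (and B)
-- raises IndexError there (grid[row][col] for col in range(len(grid[0]))).
def Pre_count_accessible_rolls (grid : List String) : Prop :=
  ∀ s ∈ grid, PySem.Str.len (PySem.List.pyGetD grid 0 "") ≤ PySem.Str.len s
instance (grid : List String) : Decidable (Pre_count_accessible_rolls grid) := by
  unfold Pre_count_accessible_rolls; infer_instance

def pvWitness_count_accessible_rolls : List String := ["@@.", ".@."]

def Spec_count_accessible_rolls (grid : List String) (out : Int) : Prop := out = count_accessible_rolls_alt grid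
instance (grid : List String) (out : Int) : Decidable (Spec_count_accessible_rolls grid out) := by unfold Spec_count_accessible_rolls; infer_instance

-- ===== CLAIM (what is proved, stated in full; the proofs are below) =====
def Claim_equal_count_accessible_rolls : Prop := ∀ (grid : List String), Dom_count_accessible_rolls grid → Pre_count_accessible_rolls grid → Spec_count_accessible_rolls grid (count_accessible_rolls grid)

-- ===== LEMMAS AND PROOFS =====

-- count of '@' among the first k characters of s
def pvPf (s : String) (k : Nat) : Int := ((s.toList.take k).countP (fun c => c == '@') : Int)

-- bounds-checked '@'-indicator at (r, c)
def pvInd (grid : List String) (rows cols r c : Int) : Int :=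
  if (0 ≤ r ∧ r < rows ∧ 0 ≤ c ∧ c < cols) ∧ pvAt grid r c = some '@' then 1 else 0

-- column-bounds-checked '@'-indicator within one row
def pvChi (s : String) (C : Nat) (c : Int) : Int :=
  if (0 ≤ c ∧ c < (C : Int)) ∧ PySem.Str.pyGet? s c = some '@' then 1 else 0

lemma pvPf_succ (s : String) (k : Nat) :
    pvPf s (k + 1) = pvPf s k + (if PySem.Str.pyGet? s (k : Int) = some '@' then 1 else 0) := by
  simp only [pvPf, List.take_add_one, List.countP_append, PySem.Str.pyGet?_natCast]
  cases h : s.toList[k]? with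
  | none => simp
  | some c => by_cases hc : c = '@' <;> simp [hc, List.countP_nil]


lemma pvChi_natCast (s : String) (C k : Nat) (hk : k < C) :
    pvChi s C (k : Int) = (if PySem.Str.pyGet? s (k : Int) = some '@' then 1 else 0) := by
  unfold pvChi
  by_cases h : PySem.Str.pyGet? s (k : Int) = some '@'
  · rw [if_pos ⟨⟨by positivity, by exact_mod_cast hk⟩, h⟩, if_pos h]
  · rw [if_neg (by rintro ⟨-, hh⟩; exact h hh), if_neg h]
lemma pvChi_out (s : String) (C : Nat) (c : Int) (h : c < 0 ∨ (C : Int) ≤ c) :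
    pvChi s C c = 0 := by
  unfold pvChi
  rw [if_neg]
  rintro ⟨⟨h0, hlt⟩, -⟩
  omega

lemma pvRowPrefix_spec (s : String) (n : Nat) :
    (PySem.List.pyRange 0 (n : Int) 1).foldl (fun (st : List Int × Int) j =>
      let c := if PySem.Str.pyGet? s j = some '@' then st.2 + 1 else st.2
      (st.1 ++ [c], c)) ([0], 0) = ((List.range (n + 1)).map (pvPf s), pvPf s n) := by
  induction n with
  | zero => simp [pvPf]
  | succ n ih =>
    have hcast : ((n + 1 : Nat) : Int) = (n : Int) + 1 := by push_cast; ring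
    rw [hcast, PySem.List.pyRange_one_succ_right (by positivity), List.foldl_append, ih]
    simp only [List.foldl_cons, List.foldl_nil]
    rw [List.range_succ (n := n + 1)]
    simp only [List.map_append, List.map_cons, List.map_nil]
    rw [pvPf_succ]
    have hsplit : (if PySem.Str.pyGet? s (n : Int) = some '@' then pvPf s n + 1 else pvPf s n) =
        pvPf s n + (if PySem.Str.pyGet? s (n : Int) = some '@' then 1 else 0) := by
      split <;> ring
    rw [hsplit]

lemma pvRowPrefix_eq (s : String) (n : Nat) :
    pvRowPrefix s (n : Int) = (List.range (n + 1)).map (pvPf s) := by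
  unfold pvRowPrefix
  rw [pvRowPrefix_spec]

lemma pvGetD_map_range_pf (s : String) (n k : Nat) (hk : k ≤ n) :
    PySem.List.pyGetD ((List.range (n + 1)).map (pvPf s)) (k : Int) 0 = pvPf s k := by
  rw [PySem.List.pyGetD_eq_getElem _ _ (by positivity) (by simp; omega)]
  simp

-- the clamped prefix-difference window telescopes into three column indicators
def pvF (s : String) (C : Nat) (c : Int) : Int := pvPf s (max 0 (min c (C : Int))).toNat

lemma pvChi_step (s : String) (C : Nat) (c : Int) :
    pvChi s C c = pvF s C (c + 1) - pvF s C c := by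
  unfold pvF
  by_cases hneg : c < 0
  · rw [pvChi_out s C c (Or.inl hneg),
      show (max 0 (min (c + 1) (C : Int))).toNat = 0 from by omega,
      show (max 0 (min c (C : Int))).toNat = 0 from by omega]
    ring
  · by_cases hbig : (C : Int) ≤ c
    · rw [pvChi_out s C c (Or.inr hbig),
        show (max 0 (min (c + 1) (C : Int))).toNat = C from by omega,
        show (max 0 (min c (C : Int))).toNat = C from by omega]
      ring
    · obtain ⟨k, rfl⟩ : ∃ k : Nat, c = (k : Int) := ⟨c.toNat, (Int.toNat_of_nonneg (by omega)).symm⟩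
      have hk : k < C := by omega
      rw [pvChi_natCast s C k hk,
        show (max 0 (min ((k : Int) + 1) (C : Int))).toNat = k + 1 from by omega,
        show (max 0 (min ((k : Int)) (C : Int))).toNat = k from by omega,
        pvPf_succ]
      ring

lemma pvPf_window (s : String) (C : Nat) (j : Int) (hj0 : 0 ≤ j) (hj : j < (C : Int)) :
    pvPf s (min (j + 2) (C : Int)).toNat - pvPf s (max (j - 1) 0).toNat =
      pvChi s C (j - 1) + pvChi s C j + pvChi s C (j + 1) := by
  have h1 := pvChi_step s C (j - 1)
  have h2 := pvChi_step s C j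
  have h3 := pvChi_step s C (j + 1)
  rw [show j - 1 + 1 = j from by ring] at h1
  rw [show (min (j + 2) (C : Int)).toNat = (max 0 (min (j + 1 + 1) (C : Int))).toNat from by omega,
    show (max (j - 1) 0).toNat = (max 0 (min (j - 1) (C : Int))).toNat from by omega]
  rw [show pvPf s (max 0 (min (j + 1 + 1) (C : Int))).toNat = pvF s C (j + 1 + 1) from rfl,
    show pvPf s (max 0 (min (j - 1) (C : Int))).toNat = pvF s C (j - 1) from rfl]
  linarith [h1, h2, h3]

-- the indicator at an in-range row reads the row through Str.pyGet?
lemma pvInd_in_row (grid : List String) (rows cols r c : Int) (C : Nat)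
    (hrows : rows = (grid.length : Int)) (hcols : cols = (C : Int))
    (hr0 : 0 ≤ r) (hr : r < rows) :
    pvInd grid rows cols r c = pvChi (grid[r.toNat]'(by omega)) C c := by
  have hget : PySem.List.pyGet? grid r = some (grid[r.toNat]'(by omega)) :=
    PySem.List.pyGet?_eq_some_getElem grid hr0 (by omega)
  unfold pvInd pvChi pvAt
  rw [hget, hcols]
  by_cases h1 : (0 ≤ c ∧ c < (C : Int)) ∧ PySem.Str.pyGet? (grid[r.toNat]'(by omega)) c = some '@'
  · rw [if_pos ⟨⟨hr0, by omega, h1.1.1, h1.1.2⟩, h1.2⟩, if_pos h1]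
  · rw [if_neg (by rintro ⟨⟨-, -, hc0, hcC⟩, hat⟩; exact h1 ⟨⟨hc0, hcC⟩, hat⟩), if_neg h1]

lemma pvWindow_eq (grid : List String) (rows cols r j : Int) (C : Nat)
    (hrows : rows = (grid.length : Int)) (hcols : cols = (C : Int))
    (hj0 : 0 ≤ j) (hj : j < cols) :
    pvWindow (grid.map (fun row => pvRowPrefix row cols)) rows cols r j =
      pvInd grid rows cols r (j - 1) + pvInd grid rows cols r j + pvInd grid rows cols r (j + 1) := by
  subst hrows hcols
  by_cases hr : r < 0 ∨ (grid.length : Int) ≤ r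
  · have hz : ∀ c, pvInd grid (grid.length : Int) (C : Int) r c = 0 := by
      intro c
      unfold pvInd
      rw [if_neg]
      rintro ⟨⟨h0, hlt, -⟩, -⟩
      omega
    unfold pvWindow
    rw [if_pos hr, hz, hz, hz]
    ring
  · have hr0 : 0 ≤ r := by omega
    have hrlt : r < (grid.length : Int) := by omega
    have hmem : r.toNat < grid.length := by omega
    unfold pvWindow
    rw [if_neg hr]
    have hp : PySem.List.pyGetD (grid.map (fun row => pvRowPrefix row (C : Int))) r [] =
        pvRowPrefix (grid[r.toNat]'hmem) (C : Int) := by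
      rw [PySem.List.pyGetD_eq_getElem _ _ hr0 (by simp; omega)]
      simp
    simp only [hp]
    rw [pvRowPrefix_eq]
    have hhiN : (min (j + 2) (C : Int)).toNat ≤ C := by omega
    have hloN : (max (j - 1) 0).toNat ≤ C := by omega
    rw [show (min (j + 2) (C : Int)) = (((min (j + 2) (C : Int)).toNat : Nat) : Int) from by omega,
      show (max (j - 1) 0) = (((max (j - 1) 0).toNat : Nat) : Int) from by omega,
      pvGetD_map_range_pf _ _ _ hhiN, pvGetD_map_range_pf _ _ _ hloN]
    rw [pvInd_in_row grid _ _ r (j - 1) C rfl rfl hr0 hrlt,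
      pvInd_in_row grid _ _ r j C rfl rfl hr0 hrlt,
      pvInd_in_row grid _ _ r (j + 1) C rfl rfl hr0 hrlt]
    exact pvPf_window (grid[r.toNat]'hmem) C j hj0 (by omega)

-- arithmetic form of one step of A's direction loop
lemma pvIfStep (a : Int) (P Q : Prop) [Decidable P] [Decidable Q] :
    (if P then (if Q then a + 1 else a) else a) = a + (if P ∧ Q then 1 else 0) := by
  split_ifs <;> simp_all

lemma pvAdj_eq (grid : List String) (rows cols i j : Int) (C : Nat)
    (hrows : rows = (grid.length : Int)) (hcols : cols = (C : Int))
    (hi0 : 0 ≤ i) (hi : i < rows) (hj0 : 0 ≤ j) (hj : j < cols)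
    (hat : pvAt grid i j = some '@') :
    (pvDirs.foldl (fun a d =>
        let nr := i + d.1
        let nc := j + d.2
        if 0 ≤ nr ∧ nr < rows ∧ 0 ≤ nc ∧ nc < cols then
          if pvAt grid nr nc = some '@' then a + 1 else a
        else a) (0 : Int)) =
      pvWindow (grid.map (fun row => pvRowPrefix row cols)) rows cols (i - 1) j +
      pvWindow (grid.map (fun row => pvRowPrefix row cols)) rows cols i j +
      pvWindow (grid.map (fun row => pvRowPrefix row cols)) rows cols (i + 1) j - 1 := by
  have hI : ∀ (r c : Int),
      (if (0 ≤ r ∧ r < rows ∧ 0 ≤ c ∧ c < cols) ∧ pvAt grid r c = some '@' then (1 : Int) else 0) =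
        pvInd grid rows cols r c := fun r c => rfl
  have hcenter : pvInd grid rows cols i j = 1 := by
    unfold pvInd
    rw [if_pos ⟨⟨hi0, hi, hj0, hj⟩, hat⟩]
  rw [pvWindow_eq grid rows cols (i - 1) j C hrows hcols hj0 hj,
    pvWindow_eq grid rows cols i j C hrows hcols hj0 hj,
    pvWindow_eq grid rows cols (i + 1) j C hrows hcols hj0 hj]
  have e1 : i + (-1 : Int) = i - 1 := by ring
  have e2 : j + (-1 : Int) = j - 1 := by ring
  simp only [pvDirs, List.foldl_cons, List.foldl_nil, pvIfStep, e1, e2, add_zero, hI]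
  rw [hcenter]
  ring

-- ===== VERDICT (by name: the statement is the Claim_ definition above) =====
theorem count_accessible_rolls_spec : Claim_equal_count_accessible_rolls := by
  intro grid _ _
  unfold Spec_count_accessible_rolls count_accessible_rolls count_accessible_rolls_alt
  by_cases hnil : grid = []
  · simp [hnil]
  · simp only [if_neg hnil]
    rw [PySem.List.foldl_append_singleton_eq_map, List.nil_append]
    apply PySem.List.foldl_congr_mem
    intro acc i hi
    apply PySem.List.foldl_congr_mem
    intro acc2 j hj
    rw [PySem.List.mem_pyRange_one] at hi hj
    by_cases hat : pvAt grid i j = some '@'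
    · simp only [hat]
      rw [pvAdj_eq grid _ _ i j ((PySem.List.pyGetD grid 0 "").length) (by simp [PySem.List.len])
        (by simp) hi.1 hi.2 hj.1 hj.2 hat]
    · simp [hat]
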